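-- pv_equiv track=rewrite | github.com/FKC117/abd_marketing | marketing/medstratix/services/panel_comparison.py | _expanded_panel_symbols
-- ===== SOURCE A (Python) =====
-- GENE_FAMILY_MEMBERS = {
--     "NTRK": {"NTRK1", "NTRK2", "NTRK3", "ETV6-NTRK3"},
--     "BRCA": {"BRCA1", "BRCA2"},
--     "MMR": {"MLH1", "MSH2", "MSH6", "PMS2"},
-- }
--
-- def _expanded_panel_symbols(panel_symbols: set[str]) -> set[str]:
--     expanded = set(panel_symbols)
--     reverse_lookup = {}
--     for family, members in GENE_FAMILY_MEMBERS.items():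
--         for member in members:
--             reverse_lookup.setdefault(member, set()).add(family)
--
--     for symbol in list(panel_symbols):
--         for family in reverse_lookup.get(symbol, set()):
--             expanded.add(family)
--         if symbol in GENE_FAMILY_MEMBERS:
--             expanded.update(GENE_FAMILY_MEMBERS[symbol])
--     return expanded
-- ===== SOURCE B (Python) =====
-- GENE_FAMILY_MEMBERS = {
--     "NTRK": {"NTRK1", "NTRK2", "NTRK3", "ETV6-NTRK3"},
--     "BRCA": {"BRCA1", "BRCA2"},
--     "MMR": {"MLH1", "MSH2", "MSH6", "PMS2"},
-- }
--
--
-- def _expanded_panel_symbols(panel_symbols):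
--     # No reverse index: each symbol's related names are found by a direct
--     # scan of the (tiny, constant) family table, and the result is a single
--     # union of generators instead of an imperative accumulation loop.
--     def related(symbol):
--         yield from (f for f, ms in GENE_FAMILY_MEMBERS.items() if symbol in ms)
--         yield from GENE_FAMILY_MEMBERS.get(symbol, ())
--     return set(panel_symbols).union(*(related(s) for s in panel_symbols))
-- ===== Notes on version B (the rewrite author's own statement) =====
-- stated objective: simpler
-- what changed: B drops the reverse_lookup index entirely: it finds each symbol's family by scanning the constant family table directly and returns one union of per-symbol generators instead of building a reverse map and mutating an accumulator set.
import Mathlib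
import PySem

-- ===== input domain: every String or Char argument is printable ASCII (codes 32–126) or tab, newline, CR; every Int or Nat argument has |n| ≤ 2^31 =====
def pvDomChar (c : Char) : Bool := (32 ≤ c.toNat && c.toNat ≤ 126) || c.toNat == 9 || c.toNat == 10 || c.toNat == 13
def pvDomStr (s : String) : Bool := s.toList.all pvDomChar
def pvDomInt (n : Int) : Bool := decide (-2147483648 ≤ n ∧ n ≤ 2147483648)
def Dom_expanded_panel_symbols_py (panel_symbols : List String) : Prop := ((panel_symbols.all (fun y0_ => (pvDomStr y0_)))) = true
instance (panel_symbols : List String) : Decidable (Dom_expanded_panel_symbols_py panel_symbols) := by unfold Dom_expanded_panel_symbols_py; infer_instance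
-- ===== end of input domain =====

-- B drops A's reverse_lookup index and scans the constant family table directly; objective: simpler.
-- Python argument/result are sets: ports use the PySem.Set (insertion-order) model of them.

-- ===== PORT A =====
-- module constant GENE_FAMILY_MEMBERS (dict of sets, in the written order)
def pvGeneFamilyMembers : PySem.Dict String (PySem.Set String) :=
  PySem.Dict.mk
    [("NTRK", ["NTRK1", "NTRK2", "NTRK3", "ETV6-NTRK3"]),
     ("BRCA", ["BRCA1", "BRCA2"]),
     ("MMR", ["MLH1", "MSH2", "MSH6", "PMS2"])]

def expanded_panel_symbols_py (panel_symbols : List String) : List String :=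
  -- expanded = set(panel_symbols)
  let expanded : PySem.Set String := PySem.Set.ofList panel_symbols
  -- reverse_lookup built by the nested loop; setdefault(member, set()).add(family)
  -- is Dict.modify member (default = empty set) (add family), exact.
  let reverse_lookup : PySem.Dict String (PySem.Set String) :=
    pvGeneFamilyMembers.items.foldl (fun rl fm =>
      fm.2.foldl (fun rl member =>
        rl.modify member PySem.Set.empty (fun s => PySem.Set.add s fm.1)) rl)
      PySem.Dict.empty
  -- second loop over panel_symbols
  panel_symbols.foldl (fun expanded symbol =>
    let expanded := (reverse_lookup.getD symbol PySem.Set.empty).foldl PySem.Set.add expanded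
    if pvGeneFamilyMembers.contains symbol then
      PySem.Set.update expanded (pvGeneFamilyMembers.getD symbol [])
    else expanded) expanded

-- ===== PORT B =====
-- related(symbol): families whose member set contains symbol, then the members if symbol names a family
def pvRelated (symbol : String) : List String :=
  (pvGeneFamilyMembers.items.filter (fun fm => PySem.Set.contains fm.2 symbol)).map (fun fm => fm.1)
    ++ pvGeneFamilyMembers.getD symbol []

def expanded_panel_symbols_py_alt (panel_symbols : List String) : List String :=
  -- set(panel_symbols).union(*(related(s) for s in panel_symbols))
  panel_symbols.foldl (fun s sym => PySem.Set.update s (pvRelated sym))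
    (PySem.Set.ofList panel_symbols)

-- ===== PRECONDITION & SPEC =====
def Spec_expanded_panel_symbols_py (panel_symbols : List String) (out : List String) : Prop := out = expanded_panel_symbols_py_alt panel_symbols
instance (panel_symbols : List String) (out : List String) : Decidable (Spec_expanded_panel_symbols_py panel_symbols out) := by unfold Spec_expanded_panel_symbols_py; infer_instance

-- ===== CLAIM (what is proved, stated in full; the proofs are below) =====
def Claim_equal_expanded_panel_symbols_py : Prop := ∀ (panel_symbols : List String), Dom_expanded_panel_symbols_py panel_symbols → Spec_expanded_panel_symbols_py panel_symbols (expanded_panel_symbols_py panel_symbols)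

-- ===== LEMMAS AND PROOFS =====

-- A's reverse_lookup is a closed constant; name it and evaluate it once.
def pvRL : PySem.Dict String (PySem.Set String) :=
  pvGeneFamilyMembers.items.foldl (fun rl fm =>
    fm.2.foldl (fun rl member =>
      rl.modify member PySem.Set.empty (fun s => PySem.Set.add s fm.1)) rl)
    PySem.Dict.empty

theorem pvRL_eval : pvRL = PySem.Dict.mk
    [("NTRK1",["NTRK"]),("NTRK2",["NTRK"]),("NTRK3",["NTRK"]),("ETV6-NTRK3",["NTRK"]),
     ("BRCA1",["BRCA"]),("BRCA2",["BRCA"]),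
     ("MLH1",["MMR"]),("MSH2",["MMR"]),("MSH6",["MMR"]),("PMS2",["MMR"])] := by decide

-- the family part of pvRelated
def pvFamL (sym : String) : List String :=
  (pvGeneFamilyMembers.items.filter (fun fm => PySem.Set.contains fm.2 sym)).map (fun fm => fm.1)

-- A's reverse lookup of sym returns exactly the families whose member set contains sym.
theorem pvRL_getD (sym : String) : pvRL.getD sym PySem.Set.empty = pvFamL sym := by
  rw [pvRL_eval]
  by_cases h1 : sym = "NTRK1"; · subst h1; decide
  by_cases h2 : sym = "NTRK2"; · subst h2; decide
  by_cases h3 : sym = "NTRK3"; · subst h3; decide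
  by_cases h4 : sym = "ETV6-NTRK3"; · subst h4; decide
  by_cases h5 : sym = "BRCA1"; · subst h5; decide
  by_cases h6 : sym = "BRCA2"; · subst h6; decide
  by_cases h7 : sym = "MLH1"; · subst h7; decide
  by_cases h8 : sym = "MSH2"; · subst h8; decide
  by_cases h9 : sym = "MSH6"; · subst h9; decide
  by_cases h10 : sym = "PMS2"; · subst h10; decide
  simp [pvFamL, pvGeneFamilyMembers, PySem.Dict.getD_eq_get?_getD, PySem.Dict.get?, h1, h2, h3, h4, h5, h6, h7, h8, h9, h10,
    Ne.symm h1, Ne.symm h2, Ne.symm h3, Ne.symm h4, Ne.symm h5, Ne.symm h6, Ne.symm h7,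
    Ne.symm h8, Ne.symm h9, Ne.symm h10]

-- one iteration of A's second loop = one union step of B
theorem pvStep_eq (e : PySem.Set String) (sym : String) :
    (if pvGeneFamilyMembers.contains sym then
        PySem.Set.update ((pvRL.getD sym PySem.Set.empty).foldl PySem.Set.add e)
          (pvGeneFamilyMembers.getD sym [])
      else (pvRL.getD sym PySem.Set.empty).foldl PySem.Set.add e)
      = PySem.Set.update e (pvRelated sym) := by
  have hfam : pvRelated sym = pvFamL sym ++ pvGeneFamilyMembers.getD sym [] := rfl
  rw [hfam, PySem.Set.update_append, pvRL_getD]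
  have hupd : PySem.Set.update e (pvFamL sym) = (pvFamL sym).foldl PySem.Set.add e := rfl
  rw [hupd]
  by_cases hc : pvGeneFamilyMembers.contains sym
  · rw [if_pos hc]
  · rw [if_neg hc]
    rw [PySem.Dict.getD_of_not_contains pvGeneFamilyMembers [] (by simpa using hc)]
    rfl

-- ===== VERDICT (by name: the statement is the Claim_ definition above) =====
theorem expanded_panel_symbols_py_spec : Claim_equal_expanded_panel_symbols_py := by
  intro panel _
  show expanded_panel_symbols_py panel = expanded_panel_symbols_py_alt panel
  have hA : expanded_panel_symbols_py panel
      = panel.foldl (fun e sym =>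
          if pvGeneFamilyMembers.contains sym then
            PySem.Set.update ((pvRL.getD sym PySem.Set.empty).foldl PySem.Set.add e)
              (pvGeneFamilyMembers.getD sym [])
          else (pvRL.getD sym PySem.Set.empty).foldl PySem.Set.add e)
        (PySem.Set.ofList panel) := rfl
  rw [hA,
    congrArg (fun f => panel.foldl f (PySem.Set.ofList panel))
      (funext fun e => funext fun sym => pvStep_eq e sym)]
  rfl
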